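-- pv_equiv track=rewrite | github.com/protocontext/protocontext | engine/scraper.py | _sort_sitemaps_by_language
-- ===== SOURCE A (Python) =====
-- def _sort_sitemaps_by_language(urls: list[str]) -> list[str]:
--     """
--     Sort sub-sitemap URLs preferring English first, then other languages.
--     Handles patterns like sitemap_en.xml, sitemap_it-IT.xml, etc.
--     """
--     en_sitemaps = []
--     other_sitemaps = []
--     for url in urls:
--         lower = url.lower()
--         if "_en." in lower or "_en-" in lower or "/en." in lower:
--             en_sitemaps.append(url)
--         else:
--             other_sitemaps.append(url)
--     return en_sitemaps + other_sitemaps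
-- ===== SOURCE B (Python) =====
-- def _sort_sitemaps_by_language(urls: list[str]) -> list[str]:
--     """English-preferring order via one stable key-sort instead of a two-list partition."""
--     def lang_rank(url: str) -> int:
--         lower = url.lower()
--         return 0 if ("_en." in lower or "_en-" in lower or "/en." in lower) else 1
--     return sorted(urls, key=lang_rank)
-- ===== Notes on version B (the rewrite author's own statement) =====
-- stated objective: idiomatic
-- what changed: Replaces the explicit two-list partition-and-concatenate with a single stable sorted() call keyed by a 0/1 language rank, relying on sort stability for the original relative order.
import Mathlib
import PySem

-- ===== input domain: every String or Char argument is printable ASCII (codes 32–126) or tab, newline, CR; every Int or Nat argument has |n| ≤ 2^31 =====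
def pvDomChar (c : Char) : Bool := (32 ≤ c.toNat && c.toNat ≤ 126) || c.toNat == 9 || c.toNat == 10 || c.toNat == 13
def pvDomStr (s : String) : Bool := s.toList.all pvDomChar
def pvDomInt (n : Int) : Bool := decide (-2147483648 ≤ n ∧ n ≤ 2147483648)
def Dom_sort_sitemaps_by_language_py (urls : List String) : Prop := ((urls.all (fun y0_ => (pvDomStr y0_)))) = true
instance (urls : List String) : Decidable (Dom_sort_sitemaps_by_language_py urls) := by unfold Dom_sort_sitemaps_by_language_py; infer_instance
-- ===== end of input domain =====

-- B replaces A's explicit two-list partition-and-concatenate by a single stable key-sort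
-- (sorted with a 0/1 language rank); proved to return the same list on all inputs.


-- ===== PORT A =====
-- literal port: two accumulator lists built in one pass, then concatenated
def sort_sitemaps_by_language_py (urls : List String) : List String :=
  let p := urls.foldl
    (fun (acc : List String × List String) url =>
      let lower := PySem.Str.lower url
      if PySem.Str.isIn "_en." lower || PySem.Str.isIn "_en-" lower || PySem.Str.isIn "/en." lower then
        (acc.1 ++ [url], acc.2)
      else
        (acc.1, acc.2 ++ [url]))
    ([], [])
  p.1 ++ p.2

-- ===== PORT B =====
-- Source B's key function: 0 for English-marked urls, 1 otherwise
def langRank (url : String) : Int :=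
  let lower := PySem.Str.lower url
  if PySem.Str.isIn "_en." lower || PySem.Str.isIn "_en-" lower || PySem.Str.isIn "/en." lower then 0 else 1

-- Source B: sorted(urls, key=lang_rank), a stable key-sort
def sort_sitemaps_by_language_py_alt (urls : List String) : List String :=
  PySem.List.sorted urls langRank false

-- ===== PRECONDITION & SPEC =====
def Spec_sort_sitemaps_by_language_py (urls : List String) (out : List String) : Prop := out = sort_sitemaps_by_language_py_alt urls
instance (urls : List String) (out : List String) : Decidable (Spec_sort_sitemaps_by_language_py urls out) := by unfold Spec_sort_sitemaps_by_language_py; infer_instance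

-- ===== CLAIM (what is proved, stated in full; the proofs are below) =====
def Claim_equal_sort_sitemaps_by_language_py : Prop := ∀ (urls : List String), Dom_sort_sitemaps_by_language_py urls → Spec_sort_sitemaps_by_language_py urls (sort_sitemaps_by_language_py urls)

-- ===== LEMMAS AND PROOFS =====

-- langRank only takes the values 0 and 1
theorem langRank01 (x : String) : langRank x = 0 ∨ langRank x = 1 := by
  by_cases h : (PySem.Str.isIn "_en." (PySem.Str.lower x) || PySem.Str.isIn "_en-" (PySem.Str.lower x) || PySem.Str.isIn "/en." (PySem.Str.lower x)) = true
  · left; simp only [langRank]; rw [if_pos h]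
  · right; simp only [langRank]; rw [if_neg h]

-- inserting an English url (rank 0) into "rank-0 block ++ rank-1 block" lands right after the rank-0 block
theorem insertBy_rank0 (x : String) (hx : langRank x = 0) :
    ∀ (E O : List String), (∀ y ∈ E, langRank y = 0) → (∀ y ∈ O, langRank y = 1) →
      PySem.List.insertBy (fun a b => decide (langRank a < langRank b)) x (E ++ O) = E ++ x :: O := by
  intro E
  induction E with
  | nil =>
    intro O _ hO
    cases O with
    | nil => rfl
    | cons y ys =>
      have : langRank y = 1 := hO y (by simp)
      show (if decide (langRank x < langRank y) = true then _ else _) = _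
      rw [hx, this]; simp
  | cons e E ih =>
    intro O hE hO
    have he : langRank e = 0 := hE e (by simp)
    show (if decide (langRank x < langRank e) = true then _ else _) = _
    rw [hx, he]
    simp only [decide_eq_true_eq, lt_self_iff_false, if_false, List.append_eq]
    rw [ih O (fun y hy => hE y (by simp [hy])) hO]; simp

-- inserting a non-English url (rank 1) goes to the very end
theorem insertBy_rank1 (x : String) (hx : langRank x = 1)
    (E O : List String) (hE : ∀ y ∈ E, langRank y = 0) (hO : ∀ y ∈ O, langRank y = 1) :
    PySem.List.insertBy (fun a b => decide (langRank a < langRank b)) x (E ++ O) = (E ++ O) ++ [x] := by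
  apply PySem.List.insertBy_of_forall_not_before
  intro y hy
  rcases List.mem_append.mp hy with h | h
  · have := hE y h; simp [hx, this]
  · have := hO y h; simp [hx, this]

-- invariant of the insertion-sort fold: the accumulator stays "rank-0 block ++ rank-1 block",
-- each block extended stably by the filtered suffix
theorem foldl_insertBy_partition :
    ∀ (xs E O : List String), (∀ y ∈ E, langRank y = 0) → (∀ y ∈ O, langRank y = 1) →
      xs.foldl (fun acc x => PySem.List.insertBy (fun a b => decide (langRank a < langRank b)) x acc) (E ++ O)
        = (E ++ xs.filter (fun x => langRank x == 0)) ++ (O ++ xs.filter (fun x => !(langRank x == 0))) := by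
  intro xs
  induction xs with
  | nil => intro E O _ _; simp
  | cons x xs ih =>
    intro E O hE hO
    simp only [List.foldl_cons]
    rcases langRank01 x with hx | hx
    · rw [insertBy_rank0 x hx E O hE hO]
      have : E ++ x :: O = (E ++ [x]) ++ O := by simp
      rw [this, ih (E ++ [x]) O
        (fun y hy => by rcases List.mem_append.mp hy with h | h
                        · exact hE y h
                        · simp at h; simp [h, hx]) hO]
      simp [hx]
    · rw [insertBy_rank1 x hx E O hE hO, List.append_assoc,
        ih E (O ++ [x]) hE
        (fun y hy => by rcases List.mem_append.mp hy with h | h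
                        · exact hO y h
                        · simp at h; simp [h, hx])]
      simp [hx]

-- B is the partition: filter of English urls ++ filter of the rest
theorem alt_eq_filters (urls : List String) :
    sort_sitemaps_by_language_py_alt urls
      = urls.filter (fun x => langRank x == 0) ++ urls.filter (fun x => !(langRank x == 0)) := by
  unfold sort_sitemaps_by_language_py_alt
  rw [PySem.List.sorted_eq_foldl_insertBy]
  have := foldl_insertBy_partition urls [] [] (by simp) (by simp)
  simpa using this

-- invariant of A's fold: the accumulator pair collects the two filters of the processed prefix
theorem foldA_partition :
    ∀ (xs : List String) (E O : List String),
      xs.foldl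
        (fun (acc : List String × List String) url =>
          let lower := PySem.Str.lower url
          if PySem.Str.isIn "_en." lower || PySem.Str.isIn "_en-" lower || PySem.Str.isIn "/en." lower then
            (acc.1 ++ [url], acc.2)
          else
            (acc.1, acc.2 ++ [url]))
        (E, O)
      = (E ++ xs.filter (fun x => langRank x == 0), O ++ xs.filter (fun x => !(langRank x == 0))) := by
  intro xs
  induction xs with
  | nil => intro E O; simp
  | cons x xs ih =>
    intro E O
    simp only [List.foldl_cons]
    by_cases hc : (PySem.Str.isIn "_en." (PySem.Str.lower x) || PySem.Str.isIn "_en-" (PySem.Str.lower x) || PySem.Str.isIn "/en." (PySem.Str.lower x)) = true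
    · have hx : langRank x = 0 := by simp only [langRank]; rw [if_pos hc]
      simp only [hc, if_true, ih, List.filter_cons, hx]
      simp
    · have hx : langRank x = 1 := by simp only [langRank]; rw [if_neg hc]
      simp only [hc, ih, List.filter_cons, hx]
      simp

-- ===== VERDICT (by name: the statement is the Claim_ definition above) =====
theorem sort_sitemaps_by_language_py_spec : Claim_equal_sort_sitemaps_by_language_py := by
  intro urls _
  show sort_sitemaps_by_language_py urls = sort_sitemaps_by_language_py_alt urls
  unfold sort_sitemaps_by_language_py
  rw [alt_eq_filters]
  simp only [foldA_partition urls [] []]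
  simp
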